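-- pv_equiv track=rewrite | github.com/miliar/Code_Jam_Webscraper | solutions_python/solutions_year16_round3_nr1/534.py | solve
-- ===== SOURCE A (Python) =====
-- def threeOrMoreParties(parties):
--     c = 0
--     for p in parties:
--         if p > 0:
--             c += 1
--         if c > 2:
--             return True
--     return c > 2
--
-- def getMaxIndex(parties):
--     idx = 0
--     maxVal = -1
--     for i in range(len(parties)):
--         if parties[i] > maxVal:
--             maxVal = parties[i]
--             idx = i
--     return idx
--
-- def twoAreEqual(parties):
--     partyCopy = sorted(parties.copy(), reverse=True)
--     return partyCopy[0] == partyCopy[1]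
--
-- def solve(parties):
--     steps = []
--
--     while sum(parties) > 0:
--
--         if threeOrMoreParties(parties):
--             idx = getMaxIndex(parties)
--             parties[idx] -= 1
--             steps.append((1, idx))
--         else:
--             if twoAreEqual(parties):
--                 #keep adding
--                 idx1 = getMaxIndex(parties)
--                 nbSenators = parties[idx1]
--                 parties[idx1] -= 1
--                 idx2 = getMaxIndex(parties)
--                 for i in range(nbSenators):
--                     steps.append((2, idx1, idx2))
--                 return steps
--             else:
--                 #make them equal
--                 idx1 = getMaxIndex(parties)
--                 parties[idx1] -= 1
--                 steps.append((1, idx1))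
-- ===== SOURCE B (Python) =====
-- # Level-sweep re-implementation: per scan it either drops a strict leader straight
-- # to the next level or evacuates one whole row of tied leaders, emitting the whole
-- # run of steps as one block and keeping a running sum and positive count.
-- # Return value only: A mutates `parties` in place, B does not.
-- def solve(parties):
--     vals = list(parties)
--     total = sum(vals)
--     if total <= 0:
--         return None
--     cnt = sum(1 for v in vals if v > 0)
--     steps = []
--     while total > 0:
--         m1 = max(vals)
--         group = [i for i, v in enumerate(vals) if v == m1]
--         g = len(group)
--         if cnt <= 2 and g >= 2:
--             steps.extend([(2, group[0], group[1])] * m1)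
--             return steps
--         if g == 1 and m1 >= 2 and g < len(vals):
--             # strict leader: take from it until it reaches the runner-up level
--             m3 = max(v for v in vals if v < m1)
--             t = m3 if m3 >= 1 else 1
--             i1 = group[0]
--             k = min(m1 - t, total)
--             steps.extend([(1, i1)] * k)
--             vals[i1] = m1 - k
--             total -= k
--         elif m1 >= 2:
--             # tied leaders: evacuate one senator from each, in index order
--             k = min(g, total)
--             steps.extend([(1, i) for i in group[:k]])
--             for i in group[:k]:
--                 vals[i] = m1 - 1
--             total -= k
--         else:
--             # m1 == 1: single step (the positive count is about to change)
--             i1 = group[0]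
--             steps.append((1, i1))
--             vals[i1] = 0
--             cnt -= 1
--             total -= 1
--     return None
-- ===== Notes on version B (the rewrite author's own statement) =====
-- stated objective: alternative
-- what changed: A re-simulates the greedy one evacuation step at a time (re-summing the list, rescanning for the positive count and the max, and sorting a copy in the two-party case); B scans once per level block: it finds the whole leading group, emits the entire run of steps (a strict leader dropping to the runner-up level, or one full row over tied leaders) as one block, and maintains the running sum and positive count incrementally.
import Mathlib
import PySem

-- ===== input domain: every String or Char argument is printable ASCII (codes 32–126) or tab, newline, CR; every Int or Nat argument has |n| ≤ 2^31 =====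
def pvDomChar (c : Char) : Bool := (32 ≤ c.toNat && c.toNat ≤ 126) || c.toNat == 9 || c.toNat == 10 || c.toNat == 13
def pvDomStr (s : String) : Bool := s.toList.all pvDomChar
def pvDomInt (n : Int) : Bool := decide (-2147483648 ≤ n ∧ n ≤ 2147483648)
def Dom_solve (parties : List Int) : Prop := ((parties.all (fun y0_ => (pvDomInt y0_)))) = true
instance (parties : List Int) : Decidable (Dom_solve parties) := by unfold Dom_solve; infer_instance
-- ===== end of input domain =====

-- B is a level-sweep re-implementation of A's one-senator-at-a-time greedy: per scan it
-- emits a whole run of steps as one block and keeps a running sum/positive count.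
-- The equality proved is about the RETURN value only: Python A mutates `parties` in
-- place, Python B does not.

-- ===== PORT A =====
def threeLoopA : List Int → Int → Bool
  | [], c => decide (2 < c)
  | p :: rest, c =>
      let c' := if 0 < p then c + 1 else c
      if 2 < c' then true else threeLoopA rest c'

def threeOrMorePartiesA (parties : List Int) : Bool := threeLoopA parties 0

def gmiLoopA : List Int → Int → Int → Int → Int
  | [], _, idx, _ => idx
  | p :: rest, i, idx, maxVal =>
      if maxVal < p then gmiLoopA rest (i + 1) i p else gmiLoopA rest (i + 1) idx maxVal

def getMaxIndexA (parties : List Int) : Int := gmiLoopA parties 0 0 (-1)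

def twoAreEqualA (parties : List Int) : Option Bool :=
  let partyCopy := PySem.List.sorted parties (fun x => x) true
  match PySem.List.pyGet? partyCopy 0, PySem.List.pyGet? partyCopy 1 with
  | some a, some b => some (a == b)
  | _, _ => none

-- termination helpers for port A (cited by decreasing_by)
theorem gmiLoopA_nonneg (l : List Int) : ∀ (i idx mv : Int), 0 ≤ i → 0 ≤ idx →
    0 ≤ gmiLoopA l i idx mv := by
  induction l with
  | nil => intro i idx mv _ h; simpa [gmiLoopA] using h
  | cons p rest ih =>
      intro i idx mv hi hidx
      simp only [gmiLoopA]
      split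
      · exact ih (i + 1) i p (by omega) hi
      · exact ih (i + 1) idx mv (by omega) hidx

theorem gmiLoopA_lt (l : List Int) : ∀ (i idx mv B : Int), idx < B → i + l.length ≤ B →
    gmiLoopA l i idx mv < B := by
  induction l with
  | nil => intro i idx mv B h _; simpa [gmiLoopA] using h
  | cons p rest ih =>
      intro i idx mv B hidx hlen
      simp only [List.length_cons] at hlen
      simp only [gmiLoopA]
      split
      · exact ih (i + 1) i p B (by omega) (by omega)
      · exact ih (i + 1) idx mv B hidx (by omega)

theorem getMaxIndexA_range (l : List Int) (h : l ≠ []) :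
    0 ≤ getMaxIndexA l ∧ getMaxIndexA l < l.length := by
  refine ⟨gmiLoopA_nonneg l 0 0 (-1) le_rfl le_rfl, ?_⟩
  have : 0 < l.length := List.length_pos_iff.mpr h
  exact gmiLoopA_lt l 0 0 (-1) l.length (by exact_mod_cast this) (by omega)

theorem sum_set_nat (l : List Int) : ∀ (n : Nat) (v : Int), n < l.length →
    (l.set n v).sum = l.sum - l.getD n 0 + v := by
  induction l with
  | nil => intro n v h; simp at h
  | cons p rest ih =>
      intro n v h
      cases n with
      | zero => simp [List.set, List.getD]; ring
      | succ m =>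
          simp only [List.set, List.sum_cons, List.getD_cons_succ]
          rw [ih m v (by simpa using h)]
          ring

theorem sum_pySetD_dec (l : List Int) (i : Int) (h0 : 0 ≤ i) (h1 : i < l.length) :
    (PySem.List.pySetD l i (PySem.List.pyGetD l i 0 - 1)).sum = l.sum - 1 := by
  have hi : i = ((i.toNat : Nat) : Int) := by omega
  rw [hi, PySem.List.pySetD_natCast, PySem.List.pyGetD_natCast]
  rw [sum_set_nat l i.toNat _ (by omega)]
  ring

def solveLoopA (parties : List Int) (steps : List (List Int)) : Option (List (List Int)) :=
  if h0 : 0 < parties.sum then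
    if threeOrMorePartiesA parties then
      let idx := getMaxIndexA parties
      solveLoopA (PySem.List.pySetD parties idx (PySem.List.pyGetD parties idx 0 - 1))
        (steps ++ [[1, idx]])
    else
      match twoAreEqualA parties with
      | none => none
      | some true =>
          let idx1 := getMaxIndexA parties
          let nb := PySem.List.pyGetD parties idx1 0
          let parties2 := PySem.List.pySetD parties idx1 (nb - 1)
          let idx2 := getMaxIndexA parties2
          some ((PySem.List.pyRange 0 nb 1).foldl (fun acc _ => acc ++ [[2, idx1, idx2]]) steps)
      | some false =>
          let idx1 := getMaxIndexA parties
          solveLoopA (PySem.List.pySetD parties idx1 (PySem.List.pyGetD parties idx1 0 - 1))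
            (steps ++ [[1, idx1]])
  else none
termination_by parties.sum.toNat
decreasing_by
  · have hne : parties ≠ [] := by
      intro hnil; rw [hnil] at h0; simp at h0
    have hr := getMaxIndexA_range parties hne
    have := sum_pySetD_dec parties (getMaxIndexA parties) hr.1 hr.2
    omega
  · have hne : parties ≠ [] := by
      intro hnil; rw [hnil] at h0; simp at h0
    have hr := getMaxIndexA_range parties hne
    have := sum_pySetD_dec parties (getMaxIndexA parties) hr.1 hr.2
    omega

def solve (parties : List Int) : Option (List (List Int)) := solveLoopA parties []

-- ===== PORT B =====
-- group = [i for i, v in enumerate(vals) if v == m1]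
def bGroup (vals : List Int) (m1 : Int) : List Int :=
  ((PySem.List.enumerate vals 0).filter (fun p => p.2 == m1)).map (fun p => p.1)

-- termination helper for port B (cited by decreasing_by)
theorem bGroup_pos (vals : List Int) (m1 : Int)
    (h : PySem.List.max? vals (fun x => x) = some m1) : 0 < (bGroup vals m1).length := by
  have hm : m1 ∈ vals := PySem.List.max?_mem h
  obtain ⟨k, hk, hv⟩ := List.getElem_of_mem hm
  have hp : (((k : Int)), m1) ∈ PySem.List.enumerate vals 0 := by
    rw [PySem.List.mem_enumerate_iff]
    exact ⟨k, hk, by simp [hv]⟩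
  have : (((k : Int)), m1) ∈ (PySem.List.enumerate vals 0).filter (fun p => p.2 == m1) := by
    simp [List.mem_filter]
    exact hp
  have : (0 + (k : Int)) ∈ bGroup vals m1 := by
    unfold bGroup
    exact List.mem_map.mpr ⟨_, this, by simp⟩
  exact List.length_pos_iff.mpr (List.ne_nil_of_mem this)

def solveLoopB (vals : List Int) (total : Int) (cnt : Int) (steps : List (List Int)) :
    Option (List (List Int)) :=
  if h0 : 0 < total then
    match hm : PySem.List.max? vals (fun x => x) with
    | none => none
    | some m1 =>
      let group := bGroup vals m1
      let g : Int := group.length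
      if hterm : cnt ≤ 2 ∧ 2 ≤ g then
        match PySem.List.pyGet? group 0, PySem.List.pyGet? group 1 with
        | some i1, some i2 => some (steps ++ PySem.List.pyRepeat [[2, i1, i2]] m1)
        | _, _ => none
      else if hlead : g = 1 ∧ 2 ≤ m1 ∧ g < vals.length then
        match h3 : PySem.List.max? (vals.filter (fun v => v < m1)) (fun x => x),
              PySem.List.pyGet? group 0 with
        | some m3, some i1 =>
            let t := if 1 ≤ m3 then m3 else 1
            let k := min (m1 - t) total
            solveLoopB (PySem.List.pySetD vals i1 (m1 - k)) (total - k) cnt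
              (steps ++ PySem.List.pyRepeat [[1, i1]] k)
        | _, _ => none
      else if hrow : 2 ≤ m1 then
        let k := min g total
        let chosen := PySem.List.slice group none (some k)
        solveLoopB (chosen.foldl (fun acc i => PySem.List.pySetD acc i (m1 - 1)) vals)
          (total - k) cnt (steps ++ chosen.map (fun i => [1, i]))
      else
        match PySem.List.pyGet? group 0 with
        | some i1 =>
            solveLoopB (PySem.List.pySetD vals i1 0) (total - 1) (cnt - 1) (steps ++ [[1, i1]])
        | none => none
  else none
termination_by total.toNat
decreasing_by
  · -- leader run: k = min (m1 - t) total ≥ 1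
    have hm3 : m3 ∈ vals.filter (fun v => v < m1) := PySem.List.max?_mem h3
    have hlt : m3 < m1 := by
      have := List.of_mem_filter hm3
      exact of_decide_eq_true this
    obtain ⟨-, hm1, -⟩ := hlead
    split <;> omega
  · -- row: k = min g total ≥ 1
    have hg := bGroup_pos vals m1 hm
    have hg' : (1 : Int) ≤ ((bGroup vals m1).length : Int) := by exact_mod_cast hg
    omega
  · omega

def solve_alt (parties : List Int) : Option (List (List Int)) :=
  let vals := parties
  let total := vals.sum
  if total ≤ 0 then none
  else
    let cnt : Int := (vals.countP (fun v => decide (0 < v)) : Nat)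
    solveLoopB vals total cnt []

-- ===== PRECONDITION & SPEC =====
-- Pre_ excludes exactly the singleton lists with a positive entry, on which the Python A
-- raises IndexError (twoAreEqual indexes the second element of a one-element list).
def Pre_solve (parties : List Int) : Prop := ¬ (parties.length = 1 ∧ 0 < parties.headD 0)
instance (parties : List Int) : Decidable (Pre_solve parties) := by unfold Pre_solve; infer_instance

def pvWitness_solve : List Int := [3, 1, 2]

def Spec_solve (parties : List Int) (out : Option (List (List Int))) : Prop :=
  out = solve_alt parties
instance (parties : List Int) (out : Option (List (List Int))) : Decidable (Spec_solve parties out) := by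
  unfold Spec_solve; infer_instance

-- ===== CLAIM (what is proved, stated in full; the proofs are below) =====
def Claim_equal_solve : Prop :=
  ∀ (parties : List Int), Dom_solve parties → Pre_solve parties → Spec_solve parties (solve parties)

-- ===== LEMMAS AND PROOFS =====

-- ---- generic helpers ----
theorem gmi_const (l : List Int) : ∀ (i idx mv : Int), (∀ x ∈ l, x ≤ mv) →
    gmiLoopA l i idx mv = idx := by
  induction l with
  | nil => intro i idx mv _; rfl
  | cons p rest ih =>
      intro i idx mv h
      have hp : p ≤ mv := h p (by simp)
      simp only [gmiLoopA, if_neg (by omega : ¬ mv < p)]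
      exact ih (i + 1) idx mv (fun x hx => h x (by simp [hx]))

theorem gmi_found (l : List Int) : ∀ (i idx mv m1 : Int) (k : Nat), k < l.length →
    mv < m1 → (∀ x ∈ l, x ≤ m1) → l.getD k 0 = m1 → (∀ j < k, l.getD j 0 < m1) →
    gmiLoopA l i idx mv = i + k := by
  induction l with
  | nil => intro i idx mv m1 k hk; simp at hk
  | cons p rest ih =>
      intro i idx mv m1 k hk hmv hmax hval hfst
      cases k with
      | zero =>
          have hp : p = m1 := by simpa using hval
          subst hp
          simp only [gmiLoopA, if_pos hmv]
          rw [gmi_const rest (i + 1) i p (fun x hx => hmax x (by simp [hx]))]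
          omega
      | succ j =>
          have hplt : p < m1 := by
            have := hfst 0 (Nat.succ_pos j); simpa using this
          have hrest : ∀ x ∈ rest, x ≤ m1 := fun x hx => hmax x (by simp [hx])
          have hrval : rest.getD j 0 = m1 := by simpa using hval
          have hrfst : ∀ j' < j, rest.getD j' 0 < m1 := by
            intro j' hj'
            have := hfst (j' + 1) (by omega)
            simpa using this
          have hrk : j < rest.length := by simpa using hk
          simp only [gmiLoopA]
          split
          · rw [ih (i + 1) i p m1 j hrk hplt hrest hrval hrfst]; push_cast; ring
          · rw [ih (i + 1) idx mv m1 j hrk hmv hrest hrval hrfst]; push_cast; ring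

theorem getMaxIndexA_eq (l : List Int) (m1 : Int) (k : Nat) (hk : k < l.length)
    (hm : -1 < m1) (hmax : ∀ x ∈ l, x ≤ m1) (hval : l.getD k 0 = m1)
    (hfst : ∀ j < k, l.getD j 0 < m1) : getMaxIndexA l = k := by
  unfold getMaxIndexA
  rw [gmi_found l 0 0 (-1) m1 k hk hm hmax hval hfst]
  omega

theorem sum_pos_exists (l : List Int) (h : 0 < l.sum) : ∃ x ∈ l, 0 < x := by
  by_contra hc
  push Not at hc
  have : l.sum ≤ 0 := by
    clear h
    induction l with
    | nil => simp
    | cons p rest ih =>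
        simp only [List.sum_cons]
        have h1 : p ≤ 0 := hc p (by simp)
        have h2 : rest.sum ≤ 0 := ih (fun x hx => hc x (by simp [hx]))
        omega
  omega

theorem threeLoopA_eq (l : List Int) : ∀ (c : Int),
    threeLoopA l c = decide (2 < c + (l.countP (fun v => decide (0 < v)) : Int)) := by
  induction l with
  | nil => intro c; simp [threeLoopA]
  | cons p rest ih =>
      intro c
      have hr : (0 : Int) ≤ (rest.countP (fun v => decide (0 < v)) : Int) := by positivity
      simp only [threeLoopA, List.countP_cons]
      by_cases hp : 0 < p
      · simp only [if_pos hp, decide_eq_true hp]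
        by_cases h2 : 2 < c + 1
        · rw [if_pos h2, eq_comm, decide_eq_true_iff]
          push_cast
          omega
        · rw [if_neg h2, ih]
          rw [decide_eq_decide]
          push_cast
          omega
      · simp only [if_neg hp, decide_eq_false hp]
        by_cases h2 : 2 < c
        · rw [if_pos h2, eq_comm, decide_eq_true_iff]
          push_cast
          omega
        · rw [if_neg h2, ih]
          rw [decide_eq_decide]
          push_cast
          omega

-- ---- bGroup characterization ----
theorem mem_bGroup (l : List Int) (m : Int) (i : Int) :
    i ∈ bGroup l m ↔ ∃ k : Nat, k < l.length ∧ i = (k : Int) ∧ l.getD k 0 = m := by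
  unfold bGroup
  constructor
  · intro h
    obtain ⟨p, hp, hpi⟩ := List.mem_map.mp h
    obtain ⟨hpe, hpv⟩ := List.mem_filter.mp hp
    obtain ⟨k, hk, hpk⟩ := (PySem.List.mem_enumerate_iff _ _ _).mp hpe
    refine ⟨k, hk, ?_, ?_⟩
    · rw [← hpi, hpk]; simp
    · have : p.2 = m := by simpa using hpv
      rw [List.getD_eq_getElem l 0 hk, ← this, hpk]
  · rintro ⟨k, hk, rfl, hv⟩
    refine List.mem_map.mpr ⟨((k : Int), l[k]), ?_, by simp⟩
    refine List.mem_filter.mpr ⟨?_, ?_⟩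
    · exact (PySem.List.mem_enumerate_iff _ _ _).mpr ⟨k, hk, by simp⟩
    · simp only [beq_iff_eq]
      rw [← List.getD_eq_getElem l 0 hk]
      exact hv

theorem pairwise_bGroup (l : List Int) (m : Int) : (bGroup l m).Pairwise (· < ·) := by
  unfold bGroup
  rw [List.pairwise_map]
  exact (PySem.List.pairwise_lt_enumerate l 0).filter _

theorem countP_enum_aux (m : Int) (l : List Int) : ∀ (s : Int),
    (PySem.List.enumerate l s).countP (fun p => p.2 == m) = l.countP (· == m) := by
  induction l with
  | nil => intro s; simp [PySem.List.enumerate_nil]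
  | cons p rest ih =>
      intro s
      rw [PySem.List.enumerate_cons]
      simp only [List.countP_cons, ih (s + 1)]

theorem length_bGroup (l : List Int) (m : Int) : (bGroup l m).length = l.count m := by
  unfold bGroup
  rw [List.length_map, ← List.countP_eq_length_filter, countP_enum_aux m l 0, List.count]

theorem head_le_of_pairwise (L : List Int) (h : L.Pairwise (· < ·)) (x : Int) (hx : x ∈ L) :
    L.getD 0 0 ≤ x := by
  cases L with
  | nil => simp at hx
  | cons p rest =>
      simp only [List.getD_cons_zero]
      rcases List.mem_cons.mp hx with rfl | hr
      · exact le_rfl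
      · exact le_of_lt ((List.pairwise_cons.mp h).1 x hr)

theorem take_mem_of_pairwise (L : List Int) : ∀ (s : Nat), s < L.length →
    L.Pairwise (· < ·) → ∀ x, (x ∈ L.take s ↔ (x ∈ L ∧ x < L.getD s 0)) := by
  induction L with
  | nil => intro s hs; simp at hs
  | cons p rest ih =>
      intro s hs hp x
      obtain ⟨hhead, hrest⟩ := List.pairwise_cons.mp hp
      cases s with
      | zero =>
          simp only [List.take_zero, List.getD_cons_zero, List.not_mem_nil, false_iff]
          rintro ⟨hx, hlt⟩
          rcases List.mem_cons.mp hx with rfl | hr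
          · omega
          · exact absurd hlt (by have := hhead x hr; omega)
      | succ t =>
          have ht : t < rest.length := by simpa using hs
          simp only [List.take_succ_cons, List.mem_cons, List.getD_cons_succ,
            ih t ht hrest x]
          constructor
          · rintro (rfl | ⟨hx, hlt⟩)
            · refine ⟨Or.inl rfl, ?_⟩
              have hmem : rest.getD t 0 ∈ rest := by
                rw [List.getD_eq_getElem rest 0 ht]
                exact List.getElem_mem ht
              exact hhead _ hmem
            · exact ⟨Or.inr hx, hlt⟩
          · rintro ⟨rfl | hx, hlt⟩
            · exact Or.inl rfl
            · exact Or.inr ⟨hx, hlt⟩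

-- ---- pyGetD / pySetD bridging ----
theorem pyGetD_int (l : List Int) (j : Int) (h : 0 ≤ j) :
    PySem.List.pyGetD l j 0 = l.getD j.toNat 0 := by
  have hj : j = ((j.toNat : Nat) : Int) := by omega
  rw [hj, PySem.List.pyGetD_natCast, Int.toNat_natCast]

theorem getD_set_nat (l : List Int) : ∀ (n k : Nat) (v : Int), n < l.length →
    (l.set n v).getD k 0 = if k = n then v else l.getD k 0 := by
  induction l with
  | nil => intro n k v h; simp at h
  | cons p rest ih =>
      intro n k v h
      cases n with
      | zero =>
          cases k with
          | zero => simp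
          | succ k' => simp
      | succ m =>
          cases k with
          | zero => simp
          | succ k' =>
              simp only [List.set_cons_succ, List.getD_cons_succ]
              rw [ih m k' v (by simpa using h)]
              simp only [Nat.succ_inj]

theorem getD_pySetD (l : List Int) (i j v : Int) (hi0 : 0 ≤ i) (hi1 : i < l.length) (hj : 0 ≤ j) :
    PySem.List.pyGetD (PySem.List.pySetD l i v) j 0 = if j = i then v else PySem.List.pyGetD l j 0 := by
  have hi : i = ((i.toNat : Nat) : Int) := by omega
  rw [hi, PySem.List.pySetD_natCast, pyGetD_int _ j hj, pyGetD_int _ j hj]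
  rw [getD_set_nat l i.toNat j.toNat v (by omega)]
  have : (j.toNat = i.toNat) = (j = (i.toNat : Int)) := by
    simp only [eq_iff_iff]; omega
  simp only [this]

theorem sum_pySetD (l : List Int) (i v : Int) (hi0 : 0 ≤ i) (hi1 : i < l.length) :
    (PySem.List.pySetD l i v).sum = l.sum - PySem.List.pyGetD l i 0 + v := by
  have hi : i = ((i.toNat : Nat) : Int) := by omega
  rw [hi, PySem.List.pySetD_natCast, PySem.List.pyGetD_natCast]
  exact sum_set_nat l i.toNat v (by omega)

theorem countP_set_nat (l : List Int) (p : Int → Bool) : ∀ (n : Nat) (v : Int), n < l.length →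
    (((l.set n v).countP p : Nat) : Int) =
      ((l.countP p : Nat) : Int) - (if p (l.getD n 0) then 1 else 0) + (if p v then 1 else 0) := by
  induction l with
  | nil => intro n v h; simp at h
  | cons q rest ih =>
      intro n v h
      cases n with
      | zero =>
          simp only [List.set_cons_zero, List.countP_cons, List.getD_cons_zero]
          push_cast
          by_cases h1 : p q <;> by_cases h2 : p v <;> simp [h1, h2]
      | succ m =>
          simp only [List.set_cons_succ, List.countP_cons, List.getD_cons_succ]
          have := ih m v (by simpa using h)
          push_cast at this ⊢
          by_cases h1 : p q <;> simp only [h1, if_true, if_false] <;> omega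

theorem countP_set_int (l : List Int) (i v : Int) (hi0 : 0 ≤ i) (hi1 : i < l.length) :
    ((PySem.List.pySetD l i v).countP (fun x => decide (0 < x)) : Int) =
      (l.countP (fun x => decide (0 < x)) : Int) -
        (if 0 < PySem.List.pyGetD l i 0 then 1 else 0) + (if 0 < v then 1 else 0) := by
  have hi : i = ((i.toNat : Nat) : Int) := by omega
  rw [hi, PySem.List.pySetD_natCast, PySem.List.pyGetD_natCast]
  have := countP_set_nat l (fun x => decide (0 < x)) i.toNat v (by omega)
  simpa using this

theorem pySetD_same (l : List Int) (i v w : Int) (h : 0 ≤ i) :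
    PySem.List.pySetD (PySem.List.pySetD l i v) i w = PySem.List.pySetD l i w := by
  have hi : i = ((i.toNat : Nat) : Int) := by omega
  rw [hi, PySem.List.pySetD_natCast, PySem.List.pySetD_natCast, PySem.List.pySetD_natCast,
    List.set_set]

theorem pySetD_self (l : List Int) (i v : Int) (h0 : 0 ≤ i) (h1 : i < l.length)
    (hv : PySem.List.pyGetD l i 0 = v) : PySem.List.pySetD l i v = l := by
  have hi : i = ((i.toNat : Nat) : Int) := by omega
  rw [hi, PySem.List.pySetD_natCast]
  rw [hi, PySem.List.pyGetD_natCast] at hv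
  rw [List.getD_eq_getElem l 0 (by omega)] at hv
  rw [← hv]
  exact List.set_getElem_self (by omega)

-- ---- max? ----
theorem max?_eq_some_of (l : List Int) (m : Int) (hm : m ∈ l) (hmax : ∀ x ∈ l, x ≤ m) :
    PySem.List.max? l (fun x => x) = some m := by
  cases h : PySem.List.max? l (fun x => x) with
  | none =>
      rw [PySem.List.max?_eq_none_iff] at h
      rw [h] at hm; simp at hm
  | some m' =>
      have h1 : m' ∈ l := PySem.List.max?_mem h
      have h2 := PySem.List.max?_isMax h m hm
      have h3 := hmax m' h1
      have : m' = m := le_antisymm h3 h2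
      rw [this]

-- ---- twoAreEqual ----
theorem twoAreEqualA_eq (l : List Int) (m1 : Int) (hlen : 2 ≤ l.length)
    (hmax : PySem.List.max? l (fun x => x) = some m1) :
    twoAreEqualA l = some (decide (2 ≤ l.count m1)) := by
  have hm1 : m1 ∈ l := PySem.List.max?_mem hmax
  have hub : ∀ x ∈ l, x ≤ m1 := fun x hx => PySem.List.max?_isMax hmax x hx
  have hperm : (PySem.List.sorted l (fun x => x) true).Perm l := PySem.List.sorted_perm l _ true
  have hpw : (PySem.List.sorted l (fun x => x) true).Pairwise (fun a b => b ≤ a) :=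
    PySem.List.sorted_pairwise_rev l (fun x => x)
  have hlens : 2 ≤ (PySem.List.sorted l (fun x => x) true).length := by
    rw [hperm.length_eq]; exact hlen
  rcases hsv : PySem.List.sorted l (fun x => x) true with _ | ⟨a, _ | ⟨b, r⟩⟩
  · rw [hsv] at hlens; simp at hlens
  · rw [hsv] at hlens; simp at hlens
  · rw [hsv] at hperm hpw
    have hget0 : PySem.List.pyGet? (a :: b :: r) (0 : Int) = some a := by
      simp [PySem.List.pyGet?_zero_cons]
    have hget1 : PySem.List.pyGet? (a :: b :: r) (1 : Int) = some b := by
      have h1 : (1 : Int) = ((1 : Nat) : Int) := rfl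
      rw [h1, PySem.List.pyGet?_natCast]
      simp
    simp only [twoAreEqualA, hsv, hget0, hget1]
    obtain ⟨hha, hrest⟩ := List.pairwise_cons.mp hpw
    have ha : a = m1 := by
      have h1 : a ≤ m1 := hub a (hperm.mem_iff.mp (by simp))
      have h2 : m1 ≤ a := by
        rcases List.mem_cons.mp (hperm.mem_iff.mpr hm1) with rfl | hr
        · exact le_rfl
        · exact hha m1 hr
      omega
    have hcount : l.count m1 = (a :: b :: r).count m1 := (hperm.count_eq m1).symm
    subst ha
    by_cases hb : b = a
    · subst hb
      have : 2 ≤ l.count b := by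
        rw [hcount]
        simp [List.count_cons]
      simp [this]
    · have hblt : b < a := by
        have : b ≤ a := hha b (by simp)
        omega
      have hr0 : r.count a = 0 := by
        rw [List.count_eq_zero]
        intro hmem
        have := (List.pairwise_cons.mp hrest).1 a hmem
        omega
      have hc1 : l.count a = 1 := by
        rw [hcount]
        simp only [List.count_cons, hr0, beq_iff_eq]
        simp [hb]
      have hd : ¬ (2 ≤ l.count a) := by omega
      have hba : (a == b) = false := by
        simp [beq_iff_eq]
        omega
      simp [hba, hd]

theorem bGroup_singleton (v : Int) : bGroup [v] v = [(0 : Int)] := by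
  simp [bGroup, PySem.List.enumerate_cons, PySem.List.enumerate_nil]

theorem pySetD_singleton (v x : Int) : PySem.List.pySetD [v] 0 x = [x] := by
  have h0 : (0 : Int) = ((0 : Nat) : Int) := rfl
  rw [h0, PySem.List.pySetD_natCast]
  rfl

theorem solveLoopB_singleton : ∀ (tn : Nat) (total : Int), total.toNat ≤ tn →
    ∀ (v cnt : Int) (steps : List (List Int)), solveLoopB [v] total cnt steps = none := by
  intro tn
  induction tn with
  | zero =>
      intro total h v cnt steps
      rw [solveLoopB]
      have h0 : ¬ 0 < total := by omega
      simp [h0]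
  | succ n ih =>
      intro total h v cnt steps
      rw [solveLoopB]
      by_cases h0 : 0 < total
      · have hmax : PySem.List.max? [v] (fun x => x) = some v :=
          max?_eq_some_of [v] v (by simp) (by simp)
        rw [dif_pos h0]
        split
        · next heq => rw [hmax] at heq
        · rename_i m1 heq
          rw [hmax] at heq
          injection heq with hv
          subst hv
          simp only [bGroup_singleton]
          have hterm : ¬ (cnt ≤ 2 ∧ 2 ≤ (([(0:Int)].length : Nat) : Int)) := by simp
          rw [dif_neg hterm]
          have hlead : ¬ ((([(0:Int)].length : Nat) : Int) = 1 ∧ 2 ≤ v ∧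
              (([(0:Int)].length : Nat) : Int) < ([v].length : Int)) := by simp
          rw [dif_neg hlead]
          by_cases hrow : 2 ≤ v
          · rw [dif_pos hrow]
            have hmin : min (([(0:Int)].length : Nat) : Int) total = 1 := by
              simp only [List.length_cons, List.length_nil]
              omega
            rw [hmin]
            have hsl : PySem.List.slice [(0:Int)] none (some (1 : Int)) = [(0:Int)] := by
              have h1 : (1 : Int) = ((1 : Nat) : Int) := rfl
              rw [h1, PySem.List.slice_to_natCast]
              rfl
            rw [hsl]
            simp only [List.foldl_cons, List.foldl_nil, pySetD_singleton]
            exact ih (total - 1) (by omega) (v - 1) cnt _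
          · rw [dif_neg hrow]
            have hget : PySem.List.pyGet? [(0:Int)] (0:Int) = some 0 := by
              simp [PySem.List.pyGet?_zero_cons]
            rw [hget]
            simp only [pySetD_singleton]
            exact ih (total - 1) (by omega) 0 (cnt - 1) _
      · simp [h0]

-- ---- A-side unified step ----
theorem pyGet?_getD (L : List Int) (i : Int) (h0 : 0 ≤ i) (h1 : i < L.length) :
    PySem.List.pyGet? L i = some (L.getD i.toNat 0) := by
  have hi : i = ((i.toNat : Nat) : Int) := by omega
  rw [hi, PySem.List.pyGet?_natCast, List.getElem?_eq_getElem (by omega),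
    List.getD_eq_getElem L 0 (by omega)]
  have hmax0 : max i 0 = i := by omega
  simp [hmax0]

theorem foldl_append_const (x : List Int) : ∀ (r : List Int) (acc : List (List Int)),
    r.foldl (fun a _ => a ++ [x]) acc = acc ++ List.replicate r.length x := by
  intro r
  induction r with
  | nil => intro acc; simp
  | cons p rest ih =>
      intro acc
      simp only [List.foldl_cons, List.length_cons, ih]
      rw [List.replicate_succ]
      simp

theorem head_eq_of_mem_le (L : List Int) (hpw : L.Pairwise (· < ·)) (a : Int)
    (ha : a ∈ L) (hle : ∀ x ∈ L, a ≤ x) : L.getD 0 0 = a := by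
  have h1 : L.getD 0 0 ≤ a := head_le_of_pairwise L hpw a ha
  have h2 : a ≤ L.getD 0 0 := by
    apply hle
    cases L with
    | nil => simp at ha
    | cons p r => simp
  omega

theorem argmax_head (l : List Int) (m1 : Int)
    (hmax : PySem.List.max? l (fun x => x) = some m1) (hm1 : -1 < m1) :
    ∃ k0 : Nat, (bGroup l m1).getD 0 0 = (k0 : Int) ∧ k0 < l.length ∧
      l.getD k0 0 = m1 ∧ getMaxIndexA l = (k0 : Int) ∧
      (∀ j < k0, l.getD j 0 < m1) := by
  have hub : ∀ x ∈ l, x ≤ m1 := fun x hx => PySem.List.max?_isMax hmax x hx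
  have hgp : 0 < (bGroup l m1).length := bGroup_pos l m1 hmax
  have hhead : (bGroup l m1).getD 0 0 ∈ bGroup l m1 := by
    rw [List.getD_eq_getElem _ 0 (by omega)]
    exact List.getElem_mem _
  obtain ⟨k0, hk0len, hk0eq, hk0val⟩ := (mem_bGroup l m1 _).mp hhead
  have hfst : ∀ j < k0, l.getD j 0 < m1 := by
    intro j hj
    have hjlen : j < l.length := by omega
    have hle : l.getD j 0 ≤ m1 := by
      apply hub
      rw [List.getD_eq_getElem l 0 hjlen]
      exact List.getElem_mem _
    rcases lt_or_eq_of_le hle with h | h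
    · exact h
    · exfalso
      have hmem : (j : Int) ∈ bGroup l m1 := (mem_bGroup l m1 _).mpr ⟨j, hjlen, rfl, h⟩
      have := head_le_of_pairwise _ (pairwise_bGroup l m1) _ hmem
      rw [hk0eq] at this
      have : k0 ≤ j := by exact_mod_cast this
      omega
  exact ⟨k0, hk0eq, hk0len, hk0val, getMaxIndexA_eq l m1 k0 hk0len hm1 hub hk0val hfst, hfst⟩

def cntPos (l : List Int) : Int := (l.countP (fun v => decide (0 < v)) : Nat)

theorem astep (l : List Int) (steps : List (List Int)) (m1 : Int)
    (hlen : 2 ≤ l.length) (hsum : 0 < l.sum)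
    (hmax : PySem.List.max? l (fun x => x) = some m1) :
    solveLoopA l steps =
      if cntPos l ≤ 2 ∧ 2 ≤ l.count m1 then
        some (steps ++ List.replicate m1.toNat
          [2, (bGroup l m1).getD 0 0,
            getMaxIndexA (PySem.List.pySetD l ((bGroup l m1).getD 0 0) (m1 - 1))])
      else
        solveLoopA (PySem.List.pySetD l ((bGroup l m1).getD 0 0) (m1 - 1))
          (steps ++ [[1, (bGroup l m1).getD 0 0]]) := by
  have hm1 : 1 ≤ m1 := by
    obtain ⟨x, hx, hxp⟩ := sum_pos_exists l hsum
    have := PySem.List.max?_isMax hmax x hx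
    omega
  obtain ⟨k0, hk0eq, hk0len, hk0val, hgmi, hfst⟩ := argmax_head l m1 hmax (by omega)
  have hgetk0 : PySem.List.pyGetD l ((k0 : Nat) : Int) 0 = m1 := by
    rw [pyGetD_int _ _ (by omega), Int.toNat_natCast]
    exact hk0val
  rw [solveLoopA]
  rw [dif_pos hsum]
  have h3eq : threeOrMorePartiesA l =
      decide (2 < (l.countP (fun v => decide (0 < v)) : Int)) := by
    rw [threeOrMorePartiesA, threeLoopA_eq]
    norm_num
  by_cases h3 : (3 : Int) ≤ cntPos l
  · have : threeOrMorePartiesA l = true := by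
      rw [h3eq, decide_eq_true_iff]
      unfold cntPos at h3
      exact_mod_cast by omega
    rw [if_pos this]
    have hcond : ¬ (cntPos l ≤ 2 ∧ 2 ≤ l.count m1) := by
      rintro ⟨h, -⟩; omega
    rw [if_neg hcond]
    simp only [hgmi, hk0eq, hgetk0]
  · have : threeOrMorePartiesA l = false := by
      rw [h3eq, decide_eq_false_iff_not]
      unfold cntPos at h3
      intro hcon
      have : (3:Int) ≤ (l.countP (fun v => decide (0 < v)) : Nat) := by exact_mod_cast hcon
      omega
    rw [if_neg (by simp [this])]
    rw [twoAreEqualA_eq l m1 hlen hmax]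
    by_cases hc : 2 ≤ l.count m1
    · rw [decide_eq_true hc]
      rw [if_pos ⟨by omega, hc⟩]
      simp only [hgmi, hk0eq, hgetk0]
      rw [foldl_append_const]
      rw [PySem.List.length_pyRange_one]
      norm_num
    · rw [decide_eq_false hc]
      rw [if_neg (by rintro ⟨-, h⟩; exact hc h)]
      simp only [hgmi, hk0eq, hgetk0]

theorem getD_nat_eq_pyGetD (L : List Int) (j : Nat) :
    L.getD j 0 = PySem.List.pyGetD L (j : Int) 0 := by
  rw [pyGetD_int L (j : Int) (by omega), Int.toNat_natCast]

theorem ub_of_getD (L : List Int) (c : Int) (h : ∀ j : Nat, j < L.length → L.getD j 0 ≤ c) :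
    ∀ x ∈ L, x ≤ c := by
  intro x hx
  obtain ⟨j, hj, rfl⟩ := List.mem_iff_getElem.mp hx
  have := h j hj
  rwa [List.getD_eq_getElem L 0 hj] at this

theorem pair01 (L : List Int) (hpw : L.Pairwise (· < ·)) (h2 : 2 ≤ L.length) :
    L.getD 0 0 < L.getD 1 0 := by
  rcases L with _ | ⟨a, _ | ⟨b, r⟩⟩
  · simp at h2
  · simp at h2
  · have := (List.pairwise_cons.mp hpw).1 b (by simp)
    simpa using this

theorem take_one_mem (L : List Int) (h2 : 2 ≤ L.length) (x : Int) :
    x ∈ L.take 1 ↔ x = L.getD 0 0 := by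
  rcases L with _ | ⟨a, r⟩
  · simp at h2
  · simp

theorem bGroup_eq_singleton (L : List Int) (m i : Int) (h1 : i ∈ bGroup L m)
    (h2 : ∀ x ∈ bGroup L m, x = i) : bGroup L m = [i] := by
  have hpw := pairwise_bGroup L m
  rcases hB : bGroup L m with _ | ⟨a, rest⟩
  · rw [hB] at h1; simp at h1
  · rw [hB] at h2 hpw
    have ha : a = i := h2 a (by simp)
    have hrest : rest = [] := by
      rcases hr : rest with _ | ⟨b, r2⟩
      · rfl
      · exfalso
        rw [hr] at h2 hpw
        have hb : b = i := h2 b (by simp)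
        have := (List.pairwise_cons.mp hpw).1 b (by simp)
        omega
    rw [ha, hrest]

theorem argmax_second (l : List Int) (m1 : Int)
    (hmax : PySem.List.max? l (fun x => x) = some m1) (hm1 : 1 ≤ m1)
    (hg2 : 2 ≤ (bGroup l m1).length) :
    getMaxIndexA (PySem.List.pySetD l ((bGroup l m1).getD 0 0) (m1 - 1)) =
      (bGroup l m1).getD 1 0 := by
  have hub : ∀ x ∈ l, x ≤ m1 := fun x hx => PySem.List.max?_isMax hmax x hx
  obtain ⟨k0, hk0eq, hk0len, hk0val, -, hfst⟩ := argmax_head l m1 hmax (by omega)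
  have he1 : (bGroup l m1).getD 1 0 ∈ bGroup l m1 := by
    rw [List.getD_eq_getElem _ 0 (by omega)]
    exact List.getElem_mem _
  obtain ⟨k1, hk1len, hk1eq, hk1val⟩ := (mem_bGroup l m1 _).mp he1
  have hk01 : k0 < k1 := by
    have := pair01 _ (pairwise_bGroup l m1) hg2
    rw [hk0eq, hk1eq] at this
    exact_mod_cast this
  rw [hk0eq]
  set l' := PySem.List.pySetD l ((k0 : Nat) : Int) (m1 - 1) with hl'
  have hlen' : l'.length = l.length := PySem.List.length_pySetD l _ _
  have hpt : ∀ j : Nat, j < l.length →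
      l'.getD j 0 = if (j : Int) = (k0 : Int) then m1 - 1 else l.getD j 0 := by
    intro j hj
    rw [getD_nat_eq_pyGetD, hl',
      getD_pySetD l _ _ _ (by omega) (by exact_mod_cast hk0len) (by omega),
      ← getD_nat_eq_pyGetD]
  have hub' : ∀ x ∈ l', x ≤ m1 := by
    apply ub_of_getD
    intro j hj
    rw [hpt j (by omega)]
    split
    · omega
    · apply hub
      rw [List.getD_eq_getElem l 0 (by rw [hlen'] at hj; omega)]
      exact List.getElem_mem _
  have hval' : l'.getD k1 0 = m1 := by
    rw [hpt k1 hk1len]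
    rw [if_neg (by exact_mod_cast by omega)]
    exact hk1val
  have hfst' : ∀ j < k1, l'.getD j 0 < m1 := by
    intro j hj
    rw [hpt j (by omega)]
    split
    · omega
    · rename_i hne
      have hjk0 : j ≠ k0 := by
        intro h; exact hne (by rw [h])
      have hle : l.getD j 0 ≤ m1 := by
        apply ub_of_getD l m1 _ _ _
        · intro j' hj'
          apply hub
          rw [List.getD_eq_getElem l 0 hj']
          exact List.getElem_mem _
        · rw [List.getD_eq_getElem l 0 (by omega)]
          exact List.getElem_mem _
      rcases lt_or_eq_of_le hle with h | h
      · exact h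
      · exfalso
        have hmem : (j : Int) ∈ bGroup l m1 := (mem_bGroup l m1 _).mpr ⟨j, by omega, rfl, h⟩
        have htk : (j : Int) ∈ (bGroup l m1).take 1 := by
          rw [take_mem_of_pairwise _ 1 (by omega) (pairwise_bGroup l m1)]
          refine ⟨hmem, ?_⟩
          rw [hk1eq]
          exact_mod_cast hj
        rw [take_one_mem _ hg2, hk0eq] at htk
        have : j = k0 := by exact_mod_cast htk
        exact hjk0 this
  rw [hk1eq]
  exact getMaxIndexA_eq l' m1 k1 (by omega) (by omega) hub' hval' hfst'

theorem foldset (m1 : Int) (hm1 : 2 ≤ m1) : ∀ (I : List Int) (l : List Int),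
    (∀ i ∈ I, 0 ≤ i ∧ i < l.length ∧ PySem.List.pyGetD l i 0 = m1) → I.Nodup →
    (I.foldl (fun a i => PySem.List.pySetD a i (m1 - 1)) l).length = l.length ∧
    (∀ j : Int, 0 ≤ j → PySem.List.pyGetD (I.foldl (fun a i => PySem.List.pySetD a i (m1 - 1)) l) j 0 =
      if j ∈ I then m1 - 1 else PySem.List.pyGetD l j 0) ∧
    (I.foldl (fun a i => PySem.List.pySetD a i (m1 - 1)) l).sum = l.sum - I.length ∧
    (I.foldl (fun a i => PySem.List.pySetD a i (m1 - 1)) l).countP (fun v => decide (0 < v)) =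
      l.countP (fun v => decide (0 < v)) := by
  intro I
  induction I with
  | nil => intro l _ _; simp
  | cons i I' ih =>
      intro l hsub hnd
      obtain ⟨hi0, hi1, hiv⟩ := hsub i (by simp)
      have hnd' : I'.Nodup := (List.nodup_cons.mp hnd).2
      have hni : i ∉ I' := (List.nodup_cons.mp hnd).1
      set l1 := PySem.List.pySetD l i (m1 - 1) with hl1
      have hlen1 : l1.length = l.length := PySem.List.length_pySetD l _ _
      have hsub' : ∀ i' ∈ I', 0 ≤ i' ∧ i' < l1.length ∧ PySem.List.pyGetD l1 i' 0 = m1 := by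
        intro i' hi'
        obtain ⟨h0, h1, hv⟩ := hsub i' (by simp [hi'])
        refine ⟨h0, by omega, ?_⟩
        rw [hl1, getD_pySetD l i i' (m1 - 1) hi0 hi1 h0]
        rw [if_neg (by intro h; rw [h] at hi'; exact hni hi')]
        exact hv
      obtain ⟨ihlen, ihpt, ihsum, ihcnt⟩ := ih l1 hsub' hnd'
      simp only [List.foldl_cons]
      refine ⟨by rw [ihlen, hlen1], ?_, ?_, ?_⟩
      · intro j hj
        rw [ihpt j hj]
        by_cases hjI : j ∈ I'
        · rw [if_pos hjI, if_pos (by simp [hjI])]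
        · rw [if_neg hjI, hl1, getD_pySetD l i j (m1 - 1) hi0 hi1 hj]
          by_cases hji : j = i
          · rw [if_pos hji, if_pos (by simp [hji])]
          · rw [if_neg hji, if_neg (by simp [hji, hjI])]
      · rw [ihsum, hl1, sum_pySetD l i (m1 - 1) hi0 hi1, hiv]
        simp only [List.length_cons]
        push_cast
        ring
      · rw [ihcnt]
        have := countP_set_int l i (m1 - 1) hi0 hi1
        rw [hiv] at this
        rw [if_pos (by omega), if_pos (by omega)] at this
        rw [hl1]
        omega

theorem run1 (l : List Int) (m1 t : Int) (k0 : Nat)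
    (hlen : 2 ≤ l.length) (hk0 : k0 < l.length) (hval : l.getD k0 0 = m1)
    (ht1 : 1 ≤ t) (ht2 : t < m1)
    (hoth : ∀ j : Nat, j < l.length → j ≠ k0 → l.getD j 0 ≤ t) :
    ∀ (s : Nat) (steps : List (List Int)), (s : Int) ≤ min (m1 - t) l.sum →
      solveLoopA l steps =
        solveLoopA (PySem.List.pySetD l ((k0 : Nat) : Int) (m1 - s))
          (steps ++ List.replicate s [1, ((k0 : Nat) : Int)]) := by
  intro s
  induction s with
  | zero =>
      intro steps _
      have hid : PySem.List.pySetD l ((k0 : Nat) : Int) (m1 - ((0 : Nat) : Int)) = l := by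
        apply pySetD_self l _ _ (by omega) (by exact_mod_cast hk0)
        rw [pyGetD_int _ _ (by omega), Int.toNat_natCast, hval]
        norm_num
      rw [hid]
      simp
  | succ s ihs =>
      intro steps hs
      have hs' : (s : Int) ≤ min (m1 - t) l.sum := by push_cast at hs ⊢; omega
      rw [ihs steps hs']
      set ls := PySem.List.pySetD l ((k0 : Nat) : Int) (m1 - s) with hls
      have hlenls : ls.length = l.length := PySem.List.length_pySetD l _ _
      have hptls : ∀ j : Nat, j < l.length →
          ls.getD j 0 = if j = k0 then m1 - s else l.getD j 0 := by
        intro j hj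
        rw [getD_nat_eq_pyGetD, hls,
          getD_pySetD l _ _ _ (by omega) (by exact_mod_cast hk0) (by omega),
          ← getD_nat_eq_pyGetD]
        by_cases hjk : j = k0
        · rw [if_pos (by exact_mod_cast hjk), if_pos hjk]
        · rw [if_neg (by exact_mod_cast hjk), if_neg hjk]
      have hsumls : ls.sum = l.sum - s := by
        rw [hls, sum_pySetD l _ _ (by omega) (by exact_mod_cast hk0),
          ← getD_nat_eq_pyGetD, hval]
        ring
      have hsumpos : 0 < ls.sum := by
        rw [hsumls]; push_cast at hs; omega
      have hms2 : t < m1 - s := by push_cast at hs; omega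
      have hub : ∀ x ∈ ls, x ≤ m1 - s := by
        apply ub_of_getD
        intro j hj
        rw [hptls j (by omega)]
        split
        · omega
        · rename_i hne
          have := hoth j (by omega) hne
          omega
      have hmem : (m1 - s) ∈ ls := by
        have := hptls k0 hk0
        rw [if_pos rfl] at this
        rw [← this, List.getD_eq_getElem ls 0 (by omega)]
        exact List.getElem_mem _
      have hmaxls : PySem.List.max? ls (fun x => x) = some (m1 - s) :=
        max?_eq_some_of ls (m1 - s) hmem hub
      have hgrpmem : ((k0 : Nat) : Int) ∈ bGroup ls (m1 - s) := by
        rw [mem_bGroup]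
        refine ⟨k0, by omega, rfl, ?_⟩
        rw [hptls k0 hk0, if_pos rfl]
      have hgrpuniq : ∀ x ∈ bGroup ls (m1 - s), x = ((k0 : Nat) : Int) := by
        intro x hx
        rw [mem_bGroup] at hx
        obtain ⟨j, hj, rfl, hjv⟩ := hx
        rw [hptls j (by omega)] at hjv
        by_cases hjk : j = k0
        · exact_mod_cast hjk
        · rw [if_neg hjk] at hjv
          have := hoth j (by omega) hjk
          omega
      have hgrp : bGroup ls (m1 - s) = [((k0 : Nat) : Int)] :=
        bGroup_eq_singleton ls (m1 - s) _ hgrpmem hgrpuniq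
      have hcount : ls.count (m1 - s) = 1 := by
        rw [← length_bGroup, hgrp]
        rfl
      rw [astep ls _ (m1 - s) (by omega) hsumpos hmaxls]
      rw [if_neg (by rintro ⟨-, h⟩; omega)]
      rw [hgrp]
      simp only [List.getD_cons_zero]
      rw [hls, pySetD_same l _ _ _ (by omega)]
      have harith : m1 - s - 1 = m1 - ((s + 1 : Nat) : Int) := by push_cast; ring
      rw [harith]
      rw [List.append_assoc, ← List.replicate_succ']

theorem run2 (l : List Int) (m1 : Int)
    (hlen : 2 ≤ l.length) (hmax : PySem.List.max? l (fun x => x) = some m1) (hm1 : 2 ≤ m1)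
    (hcnt : 3 ≤ cntPos l) :
    ∀ (s : Nat) (steps : List (List Int)),
      (s : Int) ≤ min (((bGroup l m1).length : Nat) : Int) l.sum →
      solveLoopA l steps =
        solveLoopA (((bGroup l m1).take s).foldl (fun a i => PySem.List.pySetD a i (m1 - 1)) l)
          (steps ++ ((bGroup l m1).take s).map (fun i => [1, i])) := by
  have hub : ∀ x ∈ l, x ≤ m1 := fun x hx => PySem.List.max?_isMax hmax x hx
  intro s
  induction s with
  | zero => intro steps _; simp
  | succ s ihs =>
      intro steps hs
      have hs' : (s : Int) ≤ min (((bGroup l m1).length : Nat) : Int) l.sum := by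
        push_cast at hs ⊢; omega
      rw [ihs steps hs']
      have hslt : s < (bGroup l m1).length := by push_cast at hs; omega
      have hsub : ∀ i ∈ (bGroup l m1).take s,
          0 ≤ i ∧ i < l.length ∧ PySem.List.pyGetD l i 0 = m1 := by
        intro i hi
        have := (mem_bGroup l m1 i).mp (List.mem_of_mem_take hi)
        obtain ⟨j, hj, rfl, hv⟩ := this
        exact ⟨by omega, by exact_mod_cast hj, by rw [← getD_nat_eq_pyGetD]; exact hv⟩
      have hnd : ((bGroup l m1).take s).Nodup := by
        apply List.Nodup.sublist (List.take_sublist s _)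
        exact (pairwise_bGroup l m1).imp (fun h => ne_of_lt h)
      obtain ⟨hlenf, hptf, hsumf, hcntf⟩ :=
        foldset m1 hm1 ((bGroup l m1).take s) l hsub hnd
      set ls := ((bGroup l m1).take s).foldl (fun a i => PySem.List.pySetD a i (m1 - 1)) l with hls
      have hlens : ((bGroup l m1).take s).length = s := by
        rw [List.length_take]; omega
      have hes : (bGroup l m1).getD s 0 ∈ bGroup l m1 := by
        rw [List.getD_eq_getElem _ 0 hslt]
        exact List.getElem_mem _
      obtain ⟨ks, hkslen, hkseq, hksval⟩ := (mem_bGroup l m1 _).mp hes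
      have hesnt : (bGroup l m1).getD s 0 ∉ (bGroup l m1).take s := by
        rw [take_mem_of_pairwise _ s hslt (pairwise_bGroup l m1)]
        rintro ⟨-, h⟩; omega
      have hsumpos : 0 < ls.sum := by
        rw [hsumf, hlens]; push_cast at hs; omega
      have hptn : ∀ j : Nat, j < l.length →
          ls.getD j 0 = if ((j : Nat) : Int) ∈ (bGroup l m1).take s then m1 - 1 else l.getD j 0 := by
        intro j hj
        rw [getD_nat_eq_pyGetD, hls, hptf _ (by omega), ← getD_nat_eq_pyGetD]
      have hvs : ls.getD ks 0 = m1 := by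
        rw [hptn ks hkslen, if_neg (by rw [← hkseq]; exact hesnt)]
        exact hksval
      have hubs : ∀ x ∈ ls, x ≤ m1 := by
        apply ub_of_getD
        intro j hj
        rw [hlenf] at hj
        rw [hptn j hj]
        split
        · omega
        · apply hub
          rw [List.getD_eq_getElem l 0 hj]
          exact List.getElem_mem _
      have hmems : m1 ∈ ls := by
        rw [← hvs, List.getD_eq_getElem ls 0 (by omega)]
        exact List.getElem_mem _
      have hmaxs : PySem.List.max? ls (fun x => x) = some m1 := max?_eq_some_of ls m1 hmems hubs
      have hcnts : cntPos ls = cntPos l := by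
        unfold cntPos
        rw [hls, hcntf]
      have hheads : (bGroup ls m1).getD 0 0 = (bGroup l m1).getD s 0 := by
        apply head_eq_of_mem_le _ (pairwise_bGroup ls m1)
        · rw [mem_bGroup]
          exact ⟨ks, by omega, hkseq, hvs⟩
        · intro x hx
          rw [mem_bGroup] at hx
          obtain ⟨j, hj, rfl, hjv⟩ := hx
          rw [hptn j (by omega)] at hjv
          by_cases hjt : ((j : Nat) : Int) ∈ (bGroup l m1).take s
          · rw [if_pos hjt] at hjv; omega
          · rw [if_neg hjt] at hjv
            have hjg : ((j : Nat) : Int) ∈ bGroup l m1 :=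
              (mem_bGroup l m1 _).mpr ⟨j, by omega, rfl, hjv⟩
            by_contra hcon
            push Not at hcon
            exact hjt ((take_mem_of_pairwise _ s hslt (pairwise_bGroup l m1) _).mpr ⟨hjg, hcon⟩)
      rw [astep ls _ m1 (by omega) hsumpos hmaxs]
      rw [if_neg (by rw [hcnts]; rintro ⟨h, -⟩; omega)]
      rw [hheads]
      have htksucc : (bGroup l m1).take (s + 1) =
          (bGroup l m1).take s ++ [(bGroup l m1).getD s 0] := by
        rw [List.take_succ, List.getElem?_eq_getElem hslt, List.getD_eq_getElem _ 0 hslt]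
        rfl
      rw [htksucc, List.foldl_append, List.map_append, ← List.append_assoc]
      rfl

theorem main_lemma : ∀ (n : Nat) (l : List Int) (steps : List (List Int)),
    l.sum.toNat ≤ n →
    solveLoopA l steps = solveLoopB l l.sum ((l.countP (fun v => decide (0 < v)) : Nat)) steps := by
  intro n
  induction n using Nat.strong_induction_on with
  | _ n ih =>
  intro l steps hn
  by_cases hsum : 0 < l.sum
  · have hne : l ≠ [] := by intro h; rw [h] at hsum; simp at hsum
    cases hmax : PySem.List.max? l (fun x => x) with
    | none =>
        exfalso
        rw [PySem.List.max?_eq_none_iff] at hmax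
        exact hne hmax
    | some m1 =>
    have hm1 : 1 ≤ m1 := by
      obtain ⟨x, hx, hxp⟩ := sum_pos_exists l hsum
      have := PySem.List.max?_isMax hmax x hx
      omega
    by_cases hlen : 2 ≤ l.length
    · -- main case: at least two parties
      rw [solveLoopB, dif_pos hsum]
      split
      · next heq =>
          rw [hmax] at heq
          simp at heq
      · rename_i m1' heq
        rw [hmax] at heq
        injection heq with hm
        subst hm
        have hgpos : 0 < (bGroup l m1).length := bGroup_pos l m1 hmax
        obtain ⟨k0, hk0eq, hk0len, hk0val, -, -⟩ := argmax_head l m1 hmax (by omega)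
        have hcount : l.count m1 = (bGroup l m1).length := (length_bGroup l m1).symm
        by_cases hterm : ((l.countP (fun v => decide (0 < v)) : Nat) : Int) ≤ 2 ∧
            2 ≤ (((bGroup l m1).length : Nat) : Int)
        · rw [dif_pos hterm]
          have hg2 : 2 ≤ (bGroup l m1).length := by exact_mod_cast hterm.2
          rw [pyGet?_getD _ 0 (by omega) (by exact_mod_cast hgpos),
            pyGet?_getD _ 1 (by omega) (by exact_mod_cast hg2)]
          rw [astep l steps m1 hlen hsum hmax]
          rw [if_pos ⟨hterm.1, by rw [hcount]; exact_mod_cast hterm.2⟩]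
          rw [argmax_second l m1 hmax hm1 hg2]
          simp only [PySem.List.pyRepeat_singleton]
          rfl
        · rw [dif_neg hterm]
          by_cases hlead : (((bGroup l m1).length : Nat) : Int) = 1 ∧ 2 ≤ m1 ∧
              (((bGroup l m1).length : Nat) : Int) < (l.length : Int)
          · rw [dif_pos hlead]
            obtain ⟨hg1, hm2, hglen⟩ := hlead
            have hg1' : (bGroup l m1).length = 1 := by exact_mod_cast hg1
            have hgrpeq : bGroup l m1 = [((k0 : Nat) : Int)] := by
              rcases hB : bGroup l m1 with _ | ⟨a, rest⟩
              · rw [hB] at hgpos; simp at hgpos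
              · rw [hB] at hg1'
                have : rest = [] := by
                  simp only [List.length_cons] at hg1'
                  exact List.length_eq_zero_iff.mp (by omega)
                subst this
                rw [hB] at hk0eq
                simp only [List.getD_cons_zero] at hk0eq
                rw [hk0eq]
            have hwit : ∃ x ∈ l, x < m1 := by
              set j : Nat := if k0 = 0 then 1 else 0 with hj
              have hjlen : j < l.length := by
                by_cases h : k0 = 0 <;> simp [hj, h] <;> omega
              have hjne : j ≠ k0 := by
                by_cases h : k0 = 0 <;> simp [hj, h] <;> omega
              refine ⟨l.getD j 0, by
                rw [List.getD_eq_getElem l 0 hjlen]; exact List.getElem_mem _, ?_⟩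
              have hle : l.getD j 0 ≤ m1 := by
                apply PySem.List.max?_isMax hmax
                rw [List.getD_eq_getElem l 0 hjlen]; exact List.getElem_mem _
              rcases lt_or_eq_of_le hle with h | h
              · exact h
              · exfalso
                have : ((j : Nat) : Int) ∈ bGroup l m1 :=
                  (mem_bGroup l m1 _).mpr ⟨j, hjlen, rfl, h⟩
                rw [hgrpeq] at this
                simp only [List.mem_singleton] at this
                exact hjne (by exact_mod_cast this)
            rw [hgrpeq]
            have hfilne : l.filter (fun v => decide (v < m1)) ≠ [] := by
              obtain ⟨x, hx, hxlt⟩ := hwit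
              exact List.ne_nil_of_mem (List.mem_filter.mpr ⟨hx, by simpa using hxlt⟩)
            split
            · rename_i m3 i1 heq3 heqget
              have hi1 : i1 = ((k0 : Nat) : Int) := by
                rw [PySem.List.pyGet?_zero_cons] at heqget
                injection heqget with h
                exact h.symm
              subst hi1
              have hm3mem := PySem.List.max?_mem heq3
              have hm3lt : m3 < m1 := by
                have := List.of_mem_filter hm3mem
                exact of_decide_eq_true this
              have hm3ub : ∀ x ∈ l, x < m1 → x ≤ m3 := by
                intro x hx hxlt
                exact PySem.List.max?_isMax heq3 x
                  (List.mem_filter.mpr ⟨hx, by simpa using hxlt⟩)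
              set t : Int := if 1 ≤ m3 then m3 else 1 with ht
              have ht1 : 1 ≤ t := by rw [ht]; split <;> omega
              have ht2 : t < m1 := by rw [ht]; split <;> omega
              have hoth : ∀ j : Nat, j < l.length → j ≠ k0 → l.getD j 0 ≤ t := by
                intro j hjlen hjne
                have hmem : l.getD j 0 ∈ l := by
                  rw [List.getD_eq_getElem l 0 hjlen]; exact List.getElem_mem _
                have hle : l.getD j 0 ≤ m1 := PySem.List.max?_isMax hmax _ hmem
                rcases lt_or_eq_of_le hle with h | h
                · have := hm3ub _ hmem h
                  rw [ht]; split <;> omega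
                · exfalso
                  have : ((j : Nat) : Int) ∈ bGroup l m1 :=
                    (mem_bGroup l m1 _).mpr ⟨j, hjlen, rfl, h⟩
                  rw [hgrpeq] at this
                  simp only [List.mem_singleton] at this
                  exact hjne (by exact_mod_cast this)
              set k : Int := min (m1 - t) l.sum with hk
              have hk1 : 1 ≤ k := by rw [hk]; omega
              have hkc : ((k.toNat : Nat) : Int) = k := by omega
              have hrun := run1 l m1 t k0 hlen hk0len hk0val ht1 ht2 hoth k.toNat steps
                (by rw [hkc, hk])
              rw [hkc] at hrun
              rw [hrun]
              simp only [PySem.List.pyRepeat_singleton]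
              have hsum' : (PySem.List.pySetD l ((k0 : Nat) : Int) (m1 - k)).sum = l.sum - k := by
                rw [sum_pySetD l _ _ (by omega) (by exact_mod_cast hk0len),
                  ← getD_nat_eq_pyGetD, hk0val]
                ring
              have hcnt' : ((PySem.List.pySetD l ((k0 : Nat) : Int) (m1 - k)).countP
                  (fun v => decide (0 < v)) : Int) =
                  (l.countP (fun v => decide (0 < v)) : Nat) := by
                have := countP_set_int l ((k0 : Nat) : Int) (m1 - k) (by omega)
                  (by exact_mod_cast hk0len)
                rw [← getD_nat_eq_pyGetD, hk0val] at this
                rw [if_pos (by omega), if_pos (by omega)] at this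
                omega
              have hih := ih (n - 1) (by omega)
                (PySem.List.pySetD l ((k0 : Nat) : Int) (m1 - k)) (steps ++ List.replicate k.toNat [1, ((k0 : Nat) : Int)])
                (by rw [hsum']; omega)
              rw [hih, hsum']
              congr 1
            · rename_i hnomatch
              exfalso
              cases hmf : PySem.List.max? (l.filter (fun v => decide (v < m1))) (fun x => x) with
              | none =>
                  rw [PySem.List.max?_eq_none_iff] at hmf
                  exact hfilne hmf
              | some m3w =>
                  exact hnomatch m3w ((k0 : Nat) : Int) hmf rfl
          · rw [dif_neg hlead]
            by_cases hrow : 2 ≤ m1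
            · rw [dif_pos hrow]
              have hg2 : 2 ≤ (bGroup l m1).length := by
                by_contra hcon
                have hg1 : (bGroup l m1).length = 1 := by omega
                exact hlead ⟨by exact_mod_cast hg1, hrow, by
                  rw [hg1]; exact_mod_cast by omega⟩
              have hcnt3 : 3 ≤ ((l.countP (fun v => decide (0 < v)) : Nat) : Int) := by
                by_contra hcon
                exact hterm ⟨by omega, by exact_mod_cast hg2⟩
              set k : Int := min (((bGroup l m1).length : Nat) : Int) l.sum with hk
              have hk1 : 1 ≤ k := by
                rw [hk]
                have : (1 : Int) ≤ ((bGroup l m1).length : Nat) := by exact_mod_cast hgpos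
                omega
              have hkc : ((k.toNat : Nat) : Int) = k := by omega
              have hslice : PySem.List.slice (bGroup l m1) none (some k) =
                  (bGroup l m1).take k.toNat := PySem.List.slice_to _ (by omega)
              simp only [hslice]
              have hrun := run2 l m1 hlen hmax hrow (by unfold cntPos; exact_mod_cast hcnt3)
                k.toNat steps (by rw [hkc, hk])
              rw [hrun]
              have hsub : ∀ i ∈ (bGroup l m1).take k.toNat,
                  0 ≤ i ∧ i < l.length ∧ PySem.List.pyGetD l i 0 = m1 := by
                intro i hi
                obtain ⟨j, hj, rfl, hv⟩ := (mem_bGroup l m1 i).mp (List.mem_of_mem_take hi)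
                exact ⟨by omega, by exact_mod_cast hj, by rw [← getD_nat_eq_pyGetD]; exact hv⟩
              have hnd : ((bGroup l m1).take k.toNat).Nodup := by
                apply List.Nodup.sublist (List.take_sublist k.toNat _)
                exact (pairwise_bGroup l m1).imp (fun h => ne_of_lt h)
              obtain ⟨hlenf, -, hsumf, hcntf⟩ :=
                foldset m1 hrow ((bGroup l m1).take k.toNat) l hsub hnd
              have hlentake : ((bGroup l m1).take k.toNat).length = k.toNat := by
                rw [List.length_take]
                have : k ≤ ((bGroup l m1).length : Nat) := by rw [hk]; omega
                omega
              have hsum' : (((bGroup l m1).take k.toNat).foldl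
                  (fun a i => PySem.List.pySetD a i (m1 - 1)) l).sum = l.sum - k := by
                rw [hsumf, hlentake]; omega
              have hih := ih (n - 1) (by omega)
                (((bGroup l m1).take k.toNat).foldl (fun a i => PySem.List.pySetD a i (m1 - 1)) l)
                (steps ++ ((bGroup l m1).take k.toNat).map (fun i => [1, i]))
                (by rw [hsum']; omega)
              rw [hih, hsum', hcntf]
            · rw [dif_neg hrow]
              have hm11 : m1 = 1 := by omega
              rw [pyGet?_getD _ 0 (by omega) (by exact_mod_cast hgpos)]
              rw [astep l steps m1 hlen hsum hmax]
              rw [if_neg (by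
                rintro ⟨h1, h2⟩
                rw [hcount] at h2
                unfold cntPos at h1
                exact hterm ⟨h1, by exact_mod_cast h2⟩)]
              have hheadeq : (bGroup l m1).getD (0 : Int).toNat 0 = (bGroup l m1).getD 0 0 := rfl
              rw [hheadeq, hk0eq]
              have hm10 : m1 - 1 = 0 := by omega
              rw [hm10]
              have hsum' : (PySem.List.pySetD l ((k0 : Nat) : Int) 0).sum = l.sum - 1 := by
                rw [sum_pySetD l _ _ (by omega) (by exact_mod_cast hk0len),
                  ← getD_nat_eq_pyGetD, hk0val]
                omega
              have hcnt' : ((PySem.List.pySetD l ((k0 : Nat) : Int) 0).countP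
                  (fun v => decide (0 < v)) : Int) =
                  ((l.countP (fun v => decide (0 < v)) : Nat) : Int) - 1 := by
                have := countP_set_int l ((k0 : Nat) : Int) 0 (by omega)
                  (by exact_mod_cast hk0len)
                rw [← getD_nat_eq_pyGetD, hk0val] at this
                rw [if_pos (by omega), if_neg (by omega)] at this
                omega
              have hih := ih (n - 1) (by omega)
                (PySem.List.pySetD l ((k0 : Nat) : Int) 0) (steps ++ [[1, ((k0 : Nat) : Int)]])
                (by rw [hsum']; omega)
              rw [hih, hsum', hcnt']
    · -- exactly one party
      have hlen1 : l.length = 1 := by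
        have := List.length_pos_iff.mpr hne
        omega
      obtain ⟨v, rfl⟩ := List.length_eq_one_iff.mp hlen1
      have hv : 0 < v := by simpa using hsum
      rw [solveLoopA, dif_pos hsum]
      have h3 : threeOrMorePartiesA [v] = false := by
        rw [threeOrMorePartiesA, threeLoopA_eq, decide_eq_false_iff_not]
        simp only [List.countP_cons, List.countP_nil, decide_eq_true hv]
        norm_num
      rw [if_neg (by simp [h3])]
      have htwo : twoAreEqualA [v] = none := by
        have hsorted : PySem.List.sorted [v] (fun x => x) true = [v] :=
          PySem.List.sorted_rev_eq_self_of_pairwise _ _ (by simp)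
        rw [twoAreEqualA]
        simp only [hsorted]
        have h1 : PySem.List.pyGet? [v] (1 : Int) = none := by
          have h1' : (1 : Int) = ((1 : Nat) : Int) := rfl
          rw [h1', PySem.List.pyGet?_natCast]
          rfl
        rw [h1]
        rcases PySem.List.pyGet? [v] (0 : Int) with _ | x <;> rfl
      rw [htwo]
      rw [solveLoopB_singleton ([v].sum).toNat [v].sum le_rfl v _ steps]
  · rw [solveLoopA, solveLoopB, dif_neg hsum, dif_neg hsum]

-- ===== VERDICT (by name: the statement is the Claim_ definition above) =====
theorem solve_spec : Claim_equal_solve := by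
  intro parties _ _
  unfold Spec_solve solve solve_alt
  by_cases h : parties.sum ≤ 0
  · rw [if_pos h, solveLoopA, dif_neg (by omega)]
  · rw [if_neg h]
    exact main_lemma parties.sum.toNat parties [] le_rfl
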